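-- pv_equiv track=rewrite | github.com/AMFbot-Gz/ghost-os-ultimate | tests/pytest/test_optimizer.py | compute_cycle_summary
-- ===== SOURCE A (Python) =====
-- def compute_cycle_summary(actions: list) -> dict:
--     """
--     Calcule le résumé d'un cycle à partir de la liste des actions.
--     Retourne: gaps_found, skills_gen, skills_pass, skills_fail.
--     """
--     gaps_found  = len(actions)
--     skills_gen  = sum(1 for a in actions if a.get("status") not in ("skipped", "gen_failed"))
--     skills_pass = sum(1 for a in actions if a.get("status") == "deployed")
--     skills_fail = sum(1 for a in actions if a.get("status") in ("failed", "quarantined", "gen_failed"))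
--     return {
--         "gaps_found":  gaps_found,
--         "skills_gen":  skills_gen,
--         "skills_pass": skills_pass,
--         "skills_fail": skills_fail,
--     }
-- ===== SOURCE B (Python) =====
-- def compute_cycle_summary(actions: list) -> dict:
--     # Build a frequency map of statuses once, then derive every field
--     # arithmetically from the aggregate counts (skills_gen by subtraction).
--     counts = {}
--     for a in actions:
--         s = a.get("status")
--         counts[s] = counts.get(s, 0) + 1
--     n = len(actions)
--     return {
--         "gaps_found":  n,
--         "skills_gen":  n - counts.get("skipped", 0) - counts.get("gen_failed", 0),
--         "skills_pass": counts.get("deployed", 0),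
--         "skills_fail": counts.get("failed", 0) + counts.get("quarantined", 0)
--                        + counts.get("gen_failed", 0),
--     }
-- ===== Notes on version B (the rewrite author's own statement) =====
-- stated objective: alternative
-- what changed: Replaces A's four independent filtered scans with a status frequency map built once, from which all four fields are derived arithmetically (skills_gen as n minus the skipped and gen_failed counts, skills_fail as a sum of three bucket counts).
import Mathlib
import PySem

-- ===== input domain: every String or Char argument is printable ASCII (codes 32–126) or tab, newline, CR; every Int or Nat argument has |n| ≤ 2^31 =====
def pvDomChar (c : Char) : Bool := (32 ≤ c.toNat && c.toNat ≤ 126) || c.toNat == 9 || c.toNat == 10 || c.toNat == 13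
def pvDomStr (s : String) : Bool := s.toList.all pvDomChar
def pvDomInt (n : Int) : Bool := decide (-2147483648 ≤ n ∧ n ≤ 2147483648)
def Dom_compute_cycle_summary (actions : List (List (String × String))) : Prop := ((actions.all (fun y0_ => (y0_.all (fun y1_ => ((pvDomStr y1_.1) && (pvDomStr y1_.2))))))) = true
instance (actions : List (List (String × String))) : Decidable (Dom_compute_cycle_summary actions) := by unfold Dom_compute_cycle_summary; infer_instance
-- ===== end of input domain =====

-- B builds a frequency map of statuses once and derives the four fields arithmetically
-- (skills_gen by subtraction), instead of A's four filtered scans; objective: alternative.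

-- a.get("status"): first-match lookup in the association list (shared dict primitive of both ports)
def pvStatus (a : List (String × String)) : Option String :=
  (a.find? (fun kv => kv.1 == "status")).map (·.2)

-- ===== PORT A =====
def compute_cycle_summary (actions : List (List (String × String))) : List (String × Int) :=
  let gaps_found := PySem.List.len actions
  let skills_gen := actions.foldl
    (fun acc a => if !(pvStatus a == some "skipped" || pvStatus a == some "gen_failed")
                  then acc + 1 else acc) (0 : Int)
  let skills_pass := actions.foldl
    (fun acc a => if pvStatus a == some "deployed" then acc + 1 else acc) (0 : Int)
  let skills_fail := actions.foldl
    (fun acc a => if pvStatus a == some "failed" || pvStatus a == some "quarantined"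
                     || pvStatus a == some "gen_failed"
                  then acc + 1 else acc) (0 : Int)
  [("gaps_found", gaps_found), ("skills_gen", skills_gen),
   ("skills_pass", skills_pass), ("skills_fail", skills_fail)]

-- ===== PORT B =====
def compute_cycle_summary_alt (actions : List (List (String × String))) : List (String × Int) :=
  let counts : PySem.Dict (Option String) Int := actions.foldl
    (fun d a => let s := pvStatus a; d.insert s (d.getD s 0 + 1)) PySem.Dict.empty
  let n := PySem.List.len actions
  [("gaps_found", n),
   ("skills_gen", n - counts.getD (some "skipped") 0 - counts.getD (some "gen_failed") 0),
   ("skills_pass", counts.getD (some "deployed") 0),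
   ("skills_fail", counts.getD (some "failed") 0 + counts.getD (some "quarantined") 0
                   + counts.getD (some "gen_failed") 0)]

-- ===== PRECONDITION & SPEC =====
def Spec_compute_cycle_summary (actions : List (List (String × String))) (out : List (String × Int)) : Prop := out = compute_cycle_summary_alt actions
instance (actions : List (List (String × String))) (out : List (String × Int)) : Decidable (Spec_compute_cycle_summary actions out) := by unfold Spec_compute_cycle_summary; infer_instance

-- ===== CLAIM (what is proved, stated in full; the proofs are below) =====
def Claim_equal_compute_cycle_summary : Prop := ∀ (actions : List (List (String × String))), Dom_compute_cycle_summary actions → Spec_compute_cycle_summary actions (compute_cycle_summary actions)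

-- ===== LEMMAS AND PROOFS =====

-- B's counter lookups are counts of the mapped statuses (invariant over any start dict).
theorem pv_counts_getD_aux (actions : List (List (String × String)))
    (d : PySem.Dict (Option String) Int) (k : Option String) :
    (actions.foldl (fun d a => let s := pvStatus a; d.insert s (d.getD s 0 + 1)) d).getD k 0
    = d.getD k 0 + ((actions.map pvStatus).count k : Int) := by
  induction actions generalizing d with
  | nil => simp
  | cons a rest ih =>
    simp only [List.foldl_cons, List.map_cons, List.count_cons, ih,
      PySem.Dict.getD_insert]
    by_cases h : k = pvStatus a
    · simp [h]; push_cast; ring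
    · have : (pvStatus a == k) = false := by
        simpa using fun e => h e.symm
      simp [h, this]

theorem pv_counts_getD (actions : List (List (String × String))) (k : Option String) :
    (actions.foldl (fun d a => let s := pvStatus a; d.insert s (d.getD s 0 + 1))
      (PySem.Dict.empty : PySem.Dict (Option String) Int)).getD k 0
    = ((actions.map pvStatus).count k : Int) := by
  simp [pv_counts_getD_aux]

-- A's "== deployed" scan counts occurrences of that status.
theorem pv_fold_pass (actions : List (List (String × String))) (acc : Int) :
    actions.foldl (fun acc a => if pvStatus a == some "deployed" then acc + 1 else acc) acc
    = acc + ((actions.map pvStatus).count (some "deployed") : Int) := by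
  induction actions generalizing acc with
  | nil => simp
  | cons a rest ih =>
    simp only [List.foldl_cons, List.map_cons, List.count_cons, ih]
    cases h : (pvStatus a == some "deployed") <;> simp [h] <;> push_cast <;> ring

-- A's membership scan counts the three disjoint failure statuses.
theorem pv_fold_fail (actions : List (List (String × String))) (acc : Int) :
    actions.foldl (fun acc a => if pvStatus a == some "failed" || pvStatus a == some "quarantined"
                     || pvStatus a == some "gen_failed" then acc + 1 else acc) acc
    = acc + ((actions.map pvStatus).count (some "failed") : Int)
          + ((actions.map pvStatus).count (some "quarantined") : Int)
          + ((actions.map pvStatus).count (some "gen_failed") : Int) := by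
  induction actions generalizing acc with
  | nil => simp
  | cons a rest ih =>
    simp only [List.foldl_cons, List.map_cons, List.count_cons, ih]
    cases h1 : (pvStatus a == some "failed") <;>
      cases h2 : (pvStatus a == some "quarantined") <;>
        cases h3 : (pvStatus a == some "gen_failed") <;>
          simp_all <;> push_cast <;> ring

-- A's negated-membership scan is the length minus the two excluded status counts.
theorem pv_fold_gen (actions : List (List (String × String))) (acc : Int) :
    actions.foldl (fun acc a => if !(pvStatus a == some "skipped" || pvStatus a == some "gen_failed")
                  then acc + 1 else acc) acc
    = acc + (actions.length : Int)
          - ((actions.map pvStatus).count (some "skipped") : Int)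
          - ((actions.map pvStatus).count (some "gen_failed") : Int) := by
  induction actions generalizing acc with
  | nil => simp
  | cons a rest ih =>
    simp only [List.foldl_cons, List.map_cons, List.count_cons, List.length_cons, ih]
    cases h1 : (pvStatus a == some "skipped") <;>
      cases h2 : (pvStatus a == some "gen_failed") <;>
        simp_all <;> push_cast <;> ring

-- ===== VERDICT (by name: the statement is the Claim_ definition above) =====
theorem compute_cycle_summary_spec : Claim_equal_compute_cycle_summary := by
  intro actions _
  show _ = _
  simp only [compute_cycle_summary, compute_cycle_summary_alt, pv_counts_getD,
    pv_fold_pass, pv_fold_fail, pv_fold_gen, PySem.List.len]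
  norm_num
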